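-- pv_equiv track=rewrite | github.com/RunxinXu/GIT | dee/dee_model.py | get_span_mention_info
-- ===== SOURCE A (Python) =====
-- def get_span_mention_info(span_dranges_list, doc_token_type_list):
--     span_mention_range_list = []
--     mention_drange_list = []
--     mention_type_list = []
--     for span_dranges in span_dranges_list:
--         ment_idx_s = len(mention_drange_list)
--         for drange in span_dranges:
--             mention_drange_list.append(drange)
--             sent_idx, char_s, char_e = drange
--             mention_type_list.append(doc_token_type_list[sent_idx][char_s])
--         ment_idx_e = len(mention_drange_list)
--         span_mention_range_list.append((ment_idx_s, ment_idx_e))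
--
--     return span_mention_range_list, mention_drange_list, mention_type_list
-- ===== SOURCE B (Python) =====
-- def get_span_mention_info(span_dranges_list, doc_token_type_list):
--     mention_drange_list = [d for span in span_dranges_list for d in span]
--     mention_type_list = [doc_token_type_list[s][cs] for (s, cs, ce) in mention_drange_list]
--     offs = [0]
--     for span in span_dranges_list:
--         offs.append(offs[-1] + len(span))
--     span_mention_range_list = list(zip(offs, offs[1:]))
--     return span_mention_range_list, mention_drange_list, mention_type_list
-- ===== Notes on version B (the rewrite author's own statement) =====
-- stated objective: alternative
-- what changed: Replaces A's single interleaved loop (which grows all three lists together and reads the running length for the range endpoints) by three separate passes: flatten the spans, map the type lookup over the flattened mentions, and build the (start,end) ranges by zipping the prefix sums of span lengths with their tail.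
import Mathlib
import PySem

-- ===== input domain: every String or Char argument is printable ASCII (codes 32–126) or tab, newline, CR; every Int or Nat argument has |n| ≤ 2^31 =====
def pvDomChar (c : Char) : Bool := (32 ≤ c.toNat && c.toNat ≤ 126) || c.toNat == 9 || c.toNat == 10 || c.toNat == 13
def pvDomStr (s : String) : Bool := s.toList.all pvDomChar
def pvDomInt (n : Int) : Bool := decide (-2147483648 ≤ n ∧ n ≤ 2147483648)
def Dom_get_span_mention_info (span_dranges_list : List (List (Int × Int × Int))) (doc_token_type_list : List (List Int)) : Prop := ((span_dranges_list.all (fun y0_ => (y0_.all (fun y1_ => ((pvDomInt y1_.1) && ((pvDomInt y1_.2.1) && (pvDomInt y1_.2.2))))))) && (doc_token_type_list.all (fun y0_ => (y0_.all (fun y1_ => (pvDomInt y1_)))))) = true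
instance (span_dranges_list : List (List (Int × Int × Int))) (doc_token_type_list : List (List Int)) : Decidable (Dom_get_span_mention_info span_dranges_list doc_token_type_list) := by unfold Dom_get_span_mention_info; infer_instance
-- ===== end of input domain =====

-- B rebuilds the same three outputs by separate passes (flatten, map, prefix sums of span
-- lengths) instead of A's single interleaved accumulation loop; objective: alternative decomposition.

-- ===== PORT A =====
-- Interleaved loop: one fold over spans, inner fold appends each drange and its type,
-- the outer step records (start, end) mention indices.
def get_span_mention_info (span_dranges_list : List (List (Int × Int × Int))) (doc_token_type_list : List (List Int)) : (List (Int × Int)) × (List (Int × Int × Int)) × List Int :=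
  span_dranges_list.foldl
    (fun (st : (List (Int × Int)) × (List (Int × Int × Int)) × List Int) span_dranges =>
      let ment_idx_s : Int := st.2.1.length
      let inner := span_dranges.foldl
        (fun (mt : (List (Int × Int × Int)) × List Int) drange =>
          (mt.1 ++ [drange],
           mt.2 ++ [(PySem.List.pyGet? ((PySem.List.pyGet? doc_token_type_list drange.1).getD []) drange.2.1).getD 0]))
        (st.2.1, st.2.2)
      let ment_idx_e : Int := inner.1.length
      (st.1 ++ [(ment_idx_s, ment_idx_e)], inner.1, inner.2))
    ([], [], [])

-- ===== PORT B =====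
-- Separate passes: flatten, then a map for the types, then prefix sums of span lengths
-- zipped with their own tail for the ranges.
def get_span_mention_info_alt (span_dranges_list : List (List (Int × Int × Int))) (doc_token_type_list : List (List Int)) : (List (Int × Int)) × (List (Int × Int × Int)) × List Int :=
  let mention_drange_list := span_dranges_list.flatMap (fun span => span)
  let mention_type_list := mention_drange_list.map
    (fun d => (PySem.List.pyGet? ((PySem.List.pyGet? doc_token_type_list d.1).getD []) d.2.1).getD 0)
  let offs : List Int := span_dranges_list.foldl
    (fun (offs : List Int) span => offs ++ [offs.getLast! + (span.length : Int)]) [0]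
  let span_mention_range_list := offs.zip offs.tail
  (span_mention_range_list, mention_drange_list, mention_type_list)

-- ===== PRECONDITION & SPEC =====
-- Pre_ excludes exactly the inputs where Python A raises IndexError: some mention's
-- (sent_idx, char_s) does not index into doc_token_type_list under Python indexing.
def Pre_get_span_mention_info (span_dranges_list : List (List (Int × Int × Int))) (doc_token_type_list : List (List Int)) : Prop :=
  ∀ span ∈ span_dranges_list, ∀ d ∈ span,
    ((PySem.List.pyGet? doc_token_type_list d.1).bind
      (fun row => PySem.List.pyGet? row d.2.1)).isSome = true
instance (span_dranges_list : List (List (Int × Int × Int))) (doc_token_type_list : List (List Int)) : Decidable (Pre_get_span_mention_info span_dranges_list doc_token_type_list) := by unfold Pre_get_span_mention_info; infer_instance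
def pvWitness_get_span_mention_info : (List (List (Int × Int × Int))) × List (List Int) :=
  ([[(0, 1, 2)], [], [(0, 0, 1), (-1, 2, 3)]], [[5, 6, 7], [8, 9, 10]])

def Spec_get_span_mention_info (span_dranges_list : List (List (Int × Int × Int))) (doc_token_type_list : List (List Int)) (out : (List (Int × Int)) × (List (Int × Int × Int)) × List Int) : Prop := out = get_span_mention_info_alt span_dranges_list doc_token_type_list
instance (span_dranges_list : List (List (Int × Int × Int))) (doc_token_type_list : List (List Int)) (out : (List (Int × Int)) × (List (Int × Int × Int)) × List Int) : Decidable (Spec_get_span_mention_info span_dranges_list doc_token_type_list out) := by unfold Spec_get_span_mention_info; infer_instance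

-- ===== CLAIM (what is proved, stated in full; the proofs are below) =====
def Claim_equal_get_span_mention_info : Prop := ∀ (span_dranges_list : List (List (Int × Int × Int))) (doc_token_type_list : List (List Int)), Dom_get_span_mention_info span_dranges_list doc_token_type_list → Pre_get_span_mention_info span_dranges_list doc_token_type_list → Spec_get_span_mention_info span_dranges_list doc_token_type_list (get_span_mention_info span_dranges_list doc_token_type_list)

-- ===== LEMMAS AND PROOFS =====
-- reference forms of the three outputs
def pvTy (doc_token_type_list : List (List Int)) (d : Int × Int × Int) : Int :=
  (PySem.List.pyGet? ((PySem.List.pyGet? doc_token_type_list d.1).getD []) d.2.1).getD 0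

def pvRangesFrom (n : Int) : List (List (Int × Int × Int)) → List (Int × Int)
  | [] => []
  | s :: rest => (n, n + (s.length : Int)) :: pvRangesFrom (n + (s.length : Int)) rest

def pvOffsFrom (n : Int) : List (List (Int × Int × Int)) → List Int
  | [] => []
  | s :: rest => (n + (s.length : Int)) :: pvOffsFrom (n + (s.length : Int)) rest

lemma inner_fold (dttl : List (List Int)) (span : List (Int × Int × Int))
    (m : List (Int × Int × Int)) (t : List Int) :
    span.foldl
      (fun (mt : (List (Int × Int × Int)) × List Int) drange =>
        (mt.1 ++ [drange],
         mt.2 ++ [(PySem.List.pyGet? ((PySem.List.pyGet? dttl drange.1).getD []) drange.2.1).getD 0]))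
      (m, t)
    = (m ++ span, t ++ span.map (pvTy dttl)) := by
  induction span generalizing m t with
  | nil => simp
  | cons d rest ih =>
      simp [List.foldl_cons, ih, pvTy]

lemma outer_fold (dttl : List (List Int)) (sdl : List (List (Int × Int × Int)))
    (r : List (Int × Int)) (m : List (Int × Int × Int)) (t : List Int) :
    sdl.foldl
      (fun (st : (List (Int × Int)) × (List (Int × Int × Int)) × List Int) span =>
        (st.1 ++ [((st.2.1.length : Int), ((st.2.1 ++ span).length : Int))],
         st.2.1 ++ span, st.2.2 ++ span.map (pvTy dttl)))
      (r, m, t)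
    = (r ++ pvRangesFrom (m.length : Int) sdl,
       m ++ sdl.flatMap (fun span => span),
       t ++ (sdl.flatMap (fun span => span)).map (pvTy dttl)) := by
  induction sdl generalizing r m t with
  | nil => simp [pvRangesFrom]
  | cons span rest ih =>
      simp only [List.foldl_cons]
      rw [ih]
      simp [pvRangesFrom, List.append_assoc]

lemma offs_fold (sdl : List (List (Int × Int × Int))) (l : List Int) (n : Int) :
    sdl.foldl (fun (offs : List Int) span => offs ++ [offs.getLast! + (span.length : Int)]) (l ++ [n])
    = (l ++ [n]) ++ pvOffsFrom n sdl := by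
  induction sdl generalizing l n with
  | nil => simp [pvOffsFrom]
  | cons span rest ih =>
      simp only [List.foldl_cons]
      have hlast : (l ++ [n]).getLast! = n := by simp
      rw [hlast, show l ++ [n] ++ [n + (span.length : Int)]
            = (l ++ [n]) ++ [n + (span.length : Int)] by simp,
        ih (l ++ [n]) (n + (span.length : Int))]
      simp [pvOffsFrom]

lemma zip_offs (n : Int) (sdl : List (List (Int × Int × Int))) :
    (n :: pvOffsFrom n sdl).zip (pvOffsFrom n sdl) = pvRangesFrom n sdl := by
  induction sdl generalizing n with
  | nil => simp [pvOffsFrom, pvRangesFrom]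
  | cons span rest ih => simp [pvOffsFrom, pvRangesFrom, ih]

-- ===== VERDICT (by name: the statement is the Claim_ definition above) =====
theorem get_span_mention_info_spec : Claim_equal_get_span_mention_info := by
  intro sdl dttl _ _
  unfold Spec_get_span_mention_info get_span_mention_info get_span_mention_info_alt
  simp only [inner_fold]
  rw [outer_fold, show ([0] : List Int) = [] ++ [0] by simp, offs_fold sdl [] 0]
  simp only [List.nil_append, List.cons_append, List.tail_cons, zip_offs]
  rfl
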